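-- pv_equiv track=rewrite | github.com/jason6842/CodePath | Breakout Problems Session 4/StandardProblemSetV1.py | navigate_research_station
-- ===== SOURCE A (Python) =====
-- def navigate_research_station(station_layout, observations):
--     alphabet_dct = {}
--     for i, letter in enumerate(station_layout):
--         alphabet_dct[letter] = i
--
--     time = 0
--     current_station = 0
--     for observation in observations:
--         time += abs(alphabet_dct[observation] - current_station)
--         current_station = alphabet_dct[observation]
--     return time
-- ===== SOURCE B (Python) =====
-- def navigate_research_station(station_layout, observations):
--     # Edge-crossing counting: total distance = for each gap g between positions
--     # g and g+1 of the layout, the number of moves that cross that gap.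
--     # Each move [lo, hi] is recorded in a difference array; a prefix-sum sweep
--     # then adds up the coverage of every gap.
--     idx = {}
--     for i, letter in enumerate(station_layout):
--         idx[letter] = i
--     delta = [0] * (len(station_layout) + 1)
--     current = 0
--     for o in observations:
--         p = idx[o]
--         lo, hi = (current, p) if current <= p else (p, current)
--         delta[lo] += 1
--         delta[hi] -= 1
--         current = p
--     total = 0
--     crossing = 0
--     for d in delta:
--         crossing += d
--         total += crossing
--     return total
-- ===== Notes on version B (the rewrite author's own statement) =====
-- stated objective: alternative
-- what changed: B replaces A's running sum of |position differences| by an edge-crossing count: each move is recorded as +1/-1 in a difference array over layout gaps, and a prefix-sum sweep over that array yields the total distance.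
import Mathlib
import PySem

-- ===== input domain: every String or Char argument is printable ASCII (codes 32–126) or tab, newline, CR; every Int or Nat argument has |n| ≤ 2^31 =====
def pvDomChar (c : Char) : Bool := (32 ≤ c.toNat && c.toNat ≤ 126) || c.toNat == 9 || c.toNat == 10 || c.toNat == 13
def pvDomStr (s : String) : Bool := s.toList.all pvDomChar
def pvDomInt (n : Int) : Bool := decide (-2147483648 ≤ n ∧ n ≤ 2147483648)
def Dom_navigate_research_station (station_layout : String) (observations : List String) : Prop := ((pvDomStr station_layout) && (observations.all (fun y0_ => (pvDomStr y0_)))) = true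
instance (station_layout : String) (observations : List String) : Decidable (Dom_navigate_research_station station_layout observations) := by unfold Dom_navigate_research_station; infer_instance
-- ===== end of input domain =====

-- B counts, per gap between adjacent layout positions, how many moves cross it
-- (difference array + prefix-sum sweep) instead of summing |position differences|;
-- objective: alternative algorithm of the same cost.

-- ===== PORT A =====
def navigate_research_station (station_layout : String) (observations : List String) : Int :=
  let alphabet_dct : PySem.Dict String Int :=
    (PySem.List.enumerate station_layout.toList).foldl
      (fun d p => d.insert (String.ofList [p.2]) p.1) PySem.Dict.empty
  -- alphabet_dct[observation] raises KeyError when absent: Pre_ requires every observation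
  -- to be a single character occurring in station_layout, so getD's default is never used.
  (observations.foldl
    (fun (st : Int × Int) observation =>
      (st.1 + |alphabet_dct.getD observation 0 - st.2|, alphabet_dct.getD observation 0))
    (0, 0)).1

-- ===== PORT B =====
def navigate_research_station_alt (station_layout : String) (observations : List String) : Int :=
  let idx : PySem.Dict String Int :=
    (PySem.List.enumerate station_layout.toList).foldl
      (fun d p => d.insert (String.ofList [p.2]) p.1) PySem.Dict.empty
  -- idx[o] raises KeyError when absent: excluded by Pre_ just as for A.
  -- delta[lo] += 1 / delta[hi] -= 1: indices are always in range here (0 ≤ lo ≤ hi ≤ len),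
  -- so Python never raises; ported with the total forms pyGetD/pySetD.
  let st :=
    observations.foldl
      (fun (s : List Int × Int) o =>
        let p := idx.getD o 0
        let lohi := if s.2 ≤ p then (s.2, p) else (p, s.2)
        let d1 := PySem.List.pySetD s.1 lohi.1 (PySem.List.pyGetD s.1 lohi.1 0 + 1)
        let d2 := PySem.List.pySetD d1 lohi.2 (PySem.List.pyGetD d1 lohi.2 0 - 1)
        (d2, p))
      (List.replicate (station_layout.toList.length + 1) (0 : Int), 0)
  (st.1.foldl (fun (tc : Int × Int) d => (tc.1 + (tc.2 + d), tc.2 + d)) (0, 0)).1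

-- ===== PRECONDITION & SPEC =====
-- Pre_ excludes exactly the inputs on which A raises KeyError (B raises the same KeyError):
-- every observation must be a one-character string whose character occurs in station_layout.
def Pre_navigate_research_station (station_layout : String) (observations : List String) : Prop :=
  ∀ o ∈ observations, o ∈ station_layout.toList.map (fun c => String.ofList [c])
instance (station_layout : String) (observations : List String) : Decidable (Pre_navigate_research_station station_layout observations) := by unfold Pre_navigate_research_station; infer_instance

def pvWitness_navigate_research_station : String × List String := ("abc", ["b", "a", "b"])

def Spec_navigate_research_station (station_layout : String) (observations : List String) (out : Int) : Prop := out = navigate_research_station_alt station_layout observations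
instance (station_layout : String) (observations : List String) (out : Int) : Decidable (Spec_navigate_research_station station_layout observations out) := by unfold Spec_navigate_research_station; infer_instance

-- ===== CLAIM (what is proved, stated in full; the proofs are below) =====
def Claim_equal_navigate_research_station : Prop := ∀ (station_layout : String) (observations : List String), Dom_navigate_research_station station_layout observations → Pre_navigate_research_station station_layout observations → Spec_navigate_research_station station_layout observations (navigate_research_station station_layout observations)

-- ===== LEMMAS AND PROOFS =====

-- index of the last occurrence of c among the first k+1 characters of L (-1 if none):
-- characterises the last-write-wins dict both ports build
def lastLe (L : List Char) (c : Char) : Nat → Int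
  | 0 => if L[0]? = some c then 0 else -1
  | k + 1 => if L[k + 1]? = some c then ((k + 1 : Nat) : Int) else lastLe L c k

lemma lastLe_prefix (M : List Char) (a c : Char) (j : Nat) (hj : j < M.length) :
    lastLe (M ++ [a]) c j = lastLe M c j := by
  induction j with
  | zero =>
      simp only [lastLe]
      rw [List.getElem?_append_left (by omega : 0 < M.length)]
  | succ j ih =>
      simp only [lastLe]
      rw [List.getElem?_append_left hj, ih (by omega)]

lemma lastLe_stable (M : List Char) (c : Char) (k : Nat) (hk : M.length ≤ k + 1) :
    lastLe M c (k + 1) = lastLe M c k := by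
  simp [lastLe, List.getElem?_eq_none (by omega : M.length ≤ k + 1)]

lemma ofList_singleton_inj (c a : Char) : String.ofList [c] = String.ofList [a] ↔ c = a := by
  constructor
  · intro h
    have := congrArg String.toList h
    simpa using this
  · intro h; rw [h]

lemma lastLe_last (M : List Char) (a : Char) :
    lastLe (M ++ [a]) a M.length = (M.length : Int) := by
  have hidx : (M ++ [a])[M.length]? = some a := by
    rw [List.getElem?_append_right (le_refl _)]
    simp
  cases hL : M.length with
  | zero =>
      rw [hL] at hidx
      simp only [lastLe]
      rw [hidx]
      simp
  | succ k =>
      rw [hL] at hidx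
      simp only [lastLe]
      rw [hidx]
      simp

-- the dict built by both ports' identical first loop
def aDict (L : List Char) : PySem.Dict String Int :=
  (PySem.List.enumerate L).foldl (fun d p => d.insert (String.ofList [p.2]) p.1) PySem.Dict.empty

lemma aDict_getD (L : List Char) (c : Char) (hc : c ∈ L) :
    (aDict L).getD (String.ofList [c]) 0 = lastLe L c L.length := by
  induction L using List.reverseRecOn with
  | nil => simp at hc
  | append_singleton M a ih =>
      have hd : aDict (M ++ [a]) = (aDict M).insert (String.ofList [a]) (M.length : Int) := by
        simp [aDict, PySem.List.enumerate_append, List.foldl_append,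
              PySem.List.enumerate_cons, PySem.List.enumerate_nil]
      have hlen : (M ++ [a]).length = M.length + 1 := by simp
      rw [hd, PySem.Dict.getD_insert, hlen,
          lastLe_stable (M ++ [a]) c M.length (by omega)]
      by_cases hca : c = a
      · subst hca
        rw [if_pos rfl, (lastLe_last M c).symm]
      · rw [if_neg (fun h => hca ((ofList_singleton_inj c a).1 h))]
        have hcM : c ∈ M := by
          rcases List.mem_append.1 hc with h | h
          · exact h
          · simp at h; exact absurd h hca
        rw [ih hcM]
        cases hL : M.length with
        | zero => exact absurd hcM (by simp [List.length_eq_zero_iff.1 hL])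
        | succ k =>
            have hidx : (M ++ [a])[k + 1]? = some a := by
              rw [List.getElem?_append_right (by omega)]
              simp [hL]
            have h2 : lastLe (M ++ [a]) c (k + 1) = lastLe (M ++ [a]) c k := by
              simp only [lastLe, hidx]
              rw [if_neg (fun h => hca (Option.some.inj h).symm)]
            rw [lastLe_stable M c k (by omega), h2, lastLe_prefix M a c k (by omega)]

lemma lastLe_bounds (L : List Char) (c : Char) (k : Nat) (h : lastLe L c k ≠ -1) :
    0 ≤ lastLe L c k ∧ lastLe L c k < L.length := by
  induction k with
  | zero =>
      by_cases h0 : L[0]? = some c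
      · obtain ⟨hlt, -⟩ := List.getElem?_eq_some_iff.1 h0
        simp only [lastLe, if_pos h0]
        exact ⟨le_refl 0, by exact_mod_cast hlt⟩
      · exact absurd (by simp [lastLe, h0]) h
  | succ k ih =>
      by_cases h0 : L[k + 1]? = some c
      · obtain ⟨hlt, -⟩ := List.getElem?_eq_some_iff.1 h0
        simp only [lastLe, if_pos h0]
        constructor
        · positivity
        · exact_mod_cast hlt
      · simp only [lastLe, if_neg h0] at h ⊢
        exact ih h

lemma lastLe_ne_neg_aux (L : List Char) (c : Char) (k j : Nat) (hj : j ≤ k)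
    (hget : L[j]? = some c) : lastLe L c k ≠ -1 := by
  induction k with
  | zero =>
      have : j = 0 := by omega
      subst this
      simp [lastLe, hget]
  | succ k ih =>
      by_cases h0 : L[k + 1]? = some c
      · simp only [lastLe, if_pos h0]
        intro hcontra
        omega
      · simp only [lastLe, if_neg h0]
        rcases Nat.lt_or_ge j (k + 1) with h | h
        · exact ih (by omega)
        · have : j = k + 1 := by omega
          subst this
          exact absurd hget h0
      
lemma aDict_getD_bounds (L : List Char) (c : Char) (hc : c ∈ L) :
    0 ≤ (aDict L).getD (String.ofList [c]) 0 ∧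
      (aDict L).getD (String.ofList [c]) 0 < L.length := by
  rw [aDict_getD L c hc]
  obtain ⟨j, hj, hget⟩ := List.getElem_of_mem hc
  exact lastLe_bounds L c L.length
    (lastLe_ne_neg_aux L c L.length j (by omega) (List.getElem?_eq_some_iff.2 ⟨hj, hget⟩))

-- weighted-sum characterisation of the prefix-sum sweep: Wt d = Σ_i (|d| - i) * d[i]
def Wt : List Int → Int
  | [] => 0
  | x :: xs => ((xs.length : Int) + 1) * x + Wt xs

lemma sweep_eq_Wt (d : List Int) (t r : Int) :
    (d.foldl (fun (tc : Int × Int) x => (tc.1 + (tc.2 + x), tc.2 + x)) (t, r)).1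
      = t + (d.length : Int) * r + Wt d := by
  induction d generalizing t r with
  | nil => simp [Wt]
  | cons x xs ih =>
      simp only [List.foldl_cons, Wt, List.length_cons]
      rw [ih]
      push_cast
      ring

lemma Wt_replicate_zero (m : Nat) : Wt (List.replicate m 0) = 0 := by
  induction m with
  | zero => simp [Wt]
  | succ m ih => simp [List.replicate_succ, Wt, ih]

lemma Wt_set (d : List Int) (i : Nat) (c : Int) (h : i < d.length) :
    Wt (d.set i (d.getD i 0 + c)) = Wt d + ((d.length : Int) - (i : Int)) * c := by
  induction d generalizing i with
  | nil => simp at h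
  | cons x xs ih =>
      cases i with
      | zero =>
          simp only [List.set_cons_zero, List.getD_cons_zero, Wt, List.length_cons]
          push_cast
          ring
      | succ i =>
          simp only [List.set_cons_succ, List.getD_cons_succ, Wt, List.length_cons,
            List.length_set]
          rw [ih i (by simpa using h)]
          push_cast
          ring

-- B's observation loop keeps Wt(delta) equal to A's running distance
lemma bfold_Wt (g : String → Int) (obs : List String) (delta : List Int) (cur : Int)
    (hc0 : 0 ≤ cur) (hc1 : cur < (delta.length : Int))
    (hobs : ∀ o ∈ obs, 0 ≤ g o ∧ g o < (delta.length : Int)) :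
    Wt ((obs.foldl
        (fun (s : List Int × Int) o =>
          let p := g o
          let lohi := if s.2 ≤ p then (s.2, p) else (p, s.2)
          let d1 := PySem.List.pySetD s.1 lohi.1 (PySem.List.pyGetD s.1 lohi.1 0 + 1)
          let d2 := PySem.List.pySetD d1 lohi.2 (PySem.List.pyGetD d1 lohi.2 0 - 1)
          (d2, p))
        (delta, cur)).1)
      = Wt delta
        + (obs.foldl
            (fun (st : Int × Int) o => (st.1 + |g o - st.2|, g o)) ((0 : Int), cur)).1 := by
  induction obs generalizing delta cur with
  | nil => simp
  | cons o rest ih =>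
      obtain ⟨hp0, hp1⟩ := hobs o (List.mem_cons_self)
      set p := g o with hp
      -- name lo/hi as Ints, both in [0, delta.length)
      have key : ∀ lo hi : Int, 0 ≤ lo → lo ≤ hi → hi < (delta.length : Int) →
          Wt (PySem.List.pySetD
                (PySem.List.pySetD delta lo (PySem.List.pyGetD delta lo 0 + 1))
                hi (PySem.List.pyGetD
                      (PySem.List.pySetD delta lo (PySem.List.pyGetD delta lo 0 + 1)) hi 0 - 1))
            = Wt delta + (hi - lo) := by
        intro lo hi hlo0 hlh hhi
        have hlo : lo = ((lo.toNat : Nat) : Int) := by omega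
        have hhiN : hi = ((hi.toNat : Nat) : Int) := by omega
        have hloLt : lo.toNat < delta.length := by omega
        set d1 := PySem.List.pySetD delta lo (PySem.List.pyGetD delta lo 0 + 1) with hd1
        have hd1' : d1 = delta.set lo.toNat (delta.getD lo.toNat 0 + 1) := by
          rw [hd1, PySem.List.pySetD_of_nonneg delta _ hlo0,
              PySem.List.pyGetD_eq_getElem delta 0 hlo0 (by omega),
              List.getD_eq_getElem delta 0 hloLt]
        have hlen1 : d1.length = delta.length := by rw [hd1']; simp
        have hhiLt : hi.toNat < d1.length := by omega
        have hW1 : Wt d1 = Wt delta + ((delta.length : Int) - (lo.toNat : Int)) * 1 := by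
          rw [hd1']; exact Wt_set delta lo.toNat 1 hloLt
        have hW2 : Wt (PySem.List.pySetD d1 hi (PySem.List.pyGetD d1 hi 0 - 1))
            = Wt d1 + ((d1.length : Int) - (hi.toNat : Int)) * (-1) := by
          have : PySem.List.pySetD d1 hi (PySem.List.pyGetD d1 hi 0 - 1)
              = d1.set hi.toNat (d1.getD hi.toNat 0 + (-1)) := by
            rw [PySem.List.pySetD_of_nonneg d1 _ (by omega),
                PySem.List.pyGetD_eq_getElem d1 0 (by omega) (by omega),
                List.getD_eq_getElem d1 0 hhiLt]
            ring_nf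
          rw [this]; exact Wt_set d1 hi.toNat (-1) hhiLt
        rw [hW2, hW1, hlen1]
        omega
      simp only [List.foldl_cons]
      by_cases hcp : cur ≤ p
      · have habs : |p - cur| = p - cur := abs_of_nonneg (by omega)
        have hstep := key cur p hc0 hcp hp1
        rw [if_pos hcp]
        rw [ih _ p hp0 (by
              rw [PySem.List.length_pySetD, PySem.List.length_pySetD]; exact hp1)
            (fun o' ho' => by
              rw [PySem.List.length_pySetD, PySem.List.length_pySetD]
              exact hobs o' (List.mem_cons_of_mem _ ho'))]
        have hshift : ∀ (l : List String) (t c' : Int),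
            (l.foldl (fun (st : Int × Int) o => (st.1 + |g o - st.2|, g o)) (t, c')).1
              = t + (l.foldl (fun (st : Int × Int) o => (st.1 + |g o - st.2|, g o)) (0, c')).1 := by
          intro l
          induction l with
          | nil => intro t c'; simp
          | cons x xs ihl =>
              intro t c'
              simp only [List.foldl_cons]
              rw [ihl, ihl (0 + |g x - c'|)]
              ring
        rw [hstep, hshift, hshift rest (0 + |g o - cur|)]
        rw [habs]
        ring
      · have habs : |p - cur| = cur - p := by
          rw [abs_of_nonpos (by omega)]; ring
        have hstep := key p cur hp0 (by omega) hc1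
        rw [if_neg hcp]
        rw [ih _ p hp0 (by
              rw [PySem.List.length_pySetD, PySem.List.length_pySetD]; exact hp1)
            (fun o' ho' => by
              rw [PySem.List.length_pySetD, PySem.List.length_pySetD]
              exact hobs o' (List.mem_cons_of_mem _ ho'))]
        have hshift : ∀ (l : List String) (t c' : Int),
            (l.foldl (fun (st : Int × Int) o => (st.1 + |g o - st.2|, g o)) (t, c')).1
              = t + (l.foldl (fun (st : Int × Int) o => (st.1 + |g o - st.2|, g o)) (0, c')).1 := by
          intro l
          induction l with
          | nil => intro t c'; simp
          | cons x xs ihl =>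
              intro t c'
              simp only [List.foldl_cons]
              rw [ihl, ihl (0 + |g x - c'|)]
              ring
        rw [hstep, hshift, hshift rest (0 + |g o - cur|)]
        rw [habs]
        ring

-- ===== VERDICT (by name: the statement is the Claim_ definition above) =====
theorem navigate_research_station_spec : Claim_equal_navigate_research_station := by
  intro layout obs _hdom hpre
  unfold Spec_navigate_research_station
  set L := layout.toList with hL
  have hbounds : ∀ o ∈ obs, 0 ≤ (aDict L).getD o 0 ∧
      (aDict L).getD o 0 < ((List.replicate (L.length + 1) (0 : Int)).length : Int) := by
    intro o ho
    obtain ⟨c, hcL, rfl⟩ := List.mem_map.1 (hpre o ho)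
    obtain ⟨h1, h2⟩ := aDict_getD_bounds L c hcL
    refine ⟨h1, ?_⟩
    simp only [List.length_replicate]
    push_cast
    omega
  have hB : navigate_research_station_alt layout obs
      = (((obs.foldl
          (fun (s : List Int × Int) o =>
            let p := (aDict L).getD o 0
            let lohi := if s.2 ≤ p then (s.2, p) else (p, s.2)
            let d1 := PySem.List.pySetD s.1 lohi.1 (PySem.List.pyGetD s.1 lohi.1 0 + 1)
            let d2 := PySem.List.pySetD d1 lohi.2 (PySem.List.pyGetD d1 lohi.2 0 - 1)
            (d2, p))
          (List.replicate (L.length + 1) (0 : Int), 0)).1).foldl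
            (fun (tc : Int × Int) d => (tc.1 + (tc.2 + d), tc.2 + d)) (0, 0)).1 := rfl
  rw [hB, sweep_eq_Wt, bfold_Wt (fun o => (aDict L).getD o 0) obs _ 0 (le_refl 0)
        (by simp only [List.length_replicate]; push_cast; omega) hbounds,
      Wt_replicate_zero]
  show (obs.foldl
      (fun (st : Int × Int) o => (st.1 + |(aDict L).getD o 0 - st.2|, (aDict L).getD o 0))
      (0, 0)).1 = _
  ring
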